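-- pv_equiv track=rewrite | github.com/ai-kmu/etc | algorithm/2020/0414/youngwan.py | solution
-- ===== SOURCE A (Python) =====
-- from collections import deque
--
-- def solution(food_times, k):
--     answer = 0
--     # deque를 음식의 개수만크 생성
--     eat_dq = deque(range(len(food_times)))
--     # times의 초기값은 0만 아니면 되기 때문에 1로 잡아둠
--     times = 1
--     # times == 0인 경우는 한 바퀴를 돌지 못하기 때문에 while문 밖에서 처리
--     # len(eat_dq)가 0인 경우는 남은 음식이 없다는 것을 의미
--     while times != 0 and len(eat_dq) != 0:
--         food_times, k, eat_dq, times = eat(food_times, k, eat_dq)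
--     # eat_dq가 0은 먹을 음식이 없다는 것을 의미
--     if len(eat_dq) == 0:
--         answer = -1
--     # 남은 횟수만큼 음식 섭취
--     else:
--         for i in range(k):
--             num = eat_dq.popleft()
--             eat_dq.append(num)
--         # 이전까지가 중단되기 전까지 먹은 것이므로 다음에 오는 음식을 먹을 차례
--         # index는 0부터 시작이므로 +1
--         answer = eat_dq.popleft() + 1
--     return answer
--
-- def eat(food_times, k, eat_dq):
--     # 남은 횟수를 남은 음식의 총 개수로 나누어 준다
--     # times는 몇 바퀴 돌 수 있는지를 계산
--     times = k // len(eat_dq)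
--     # after_times는 남은 시간을 계산
--     after_times = k % len(eat_dq)
--     for i in range(len(eat_dq)):
--         eat_num = eat_dq.popleft()
--         # times보다 이번에 먹을 음식 섭취 시간이 적다면 그만큼을 after_times(남은 시간)에 더해준다
--         if food_times[eat_num] <= times:
--             after_times += times - food_times[eat_num]
--             food_times[eat_num] = 0
--         # times보다 이번에 먹을 음식 섭취 시간이 길다면 times만큼 빼주고 다시 deque에 넣어준다
--         else:
--             food_times[eat_num] -= times
--             eat_dq.append(eat_num)
--     return food_times, after_times, eat_dq, times
-- ===== SOURCE B (Python) =====
-- def solution(food_times, k):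
--     n = len(food_times)
--     order = sorted(range(n), key=lambda i: food_times[i])
--     vals = [food_times[i] for i in order]
--     pos = 0          # survivors are order[pos:], each with remaining time vals[j] - offset
--     offset = 0       # total time already subtracted from every survivor
--     times = 1
--     while times != 0 and pos < n:
--         m = n - pos
--         times = k // m
--         after = k % m
--         bound = offset + times
--         while pos < n and vals[pos] <= bound:
--             after += bound - vals[pos]
--             pos += 1
--         offset = bound
--         k = after
--     if pos == n:
--         return -1
--     rem = sorted(order[pos:])
--     return rem[k % (n - pos)] + 1
-- ===== Notes on version B (the rewrite author's own statement) =====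
-- stated objective: faster
-- what changed: Replaces the repeated O(n) deque sweeps (one full pass over all surviving foods per round) by a single sort of the eating times plus a monotone pointer with a running offset, recovering the surviving indices by slicing the sorted order.
import Mathlib
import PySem

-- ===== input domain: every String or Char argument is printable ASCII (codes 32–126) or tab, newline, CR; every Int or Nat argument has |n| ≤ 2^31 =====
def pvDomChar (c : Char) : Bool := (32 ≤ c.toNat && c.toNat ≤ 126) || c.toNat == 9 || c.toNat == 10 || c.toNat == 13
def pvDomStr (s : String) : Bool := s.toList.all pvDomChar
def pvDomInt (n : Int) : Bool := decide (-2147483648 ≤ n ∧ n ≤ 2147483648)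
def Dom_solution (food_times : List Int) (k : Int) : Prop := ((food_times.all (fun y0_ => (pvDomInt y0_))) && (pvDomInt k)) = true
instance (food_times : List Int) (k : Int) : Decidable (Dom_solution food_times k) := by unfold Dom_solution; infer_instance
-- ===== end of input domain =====

-- ===== PORT A =====
-- Header: B replaces A's per-round deque sweep by sort + monotone pointer (faster); note: Python A
-- mutates its food_times argument in place — the equivalence proved here is about the return value only.
-- the inner `for i in range(len(eat_dq))` of `eat`: pops left, updates food_times, re-appends survivors
def pvEatLoop (m : Nat) (t : Int) (f : List Int) (dq : List Int) (after : Int) :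
    List Int × List Int × Int :=
  match m, dq with
  | 0, dq => (f, dq, after)
  | Nat.succ _, [] => (f, [], after)   -- unreachable: the loop runs len(eat_dq) times and pops once per step
  | Nat.succ m', e :: rest =>
    let fe := PySem.List.pyGetD f e 0
    if fe ≤ t then
      pvEatLoop m' t (PySem.List.pySetD f e 0) rest (after + (t - fe))
    else
      pvEatLoop m' t (PySem.List.pySetD f e (fe - t)) (rest ++ [e]) after

def pvEat (f : List Int) (k : Int) (dq : List Int) : List Int × Int × List Int × Int :=
  let times := PySem.Int.floordiv k (dq.length : Int)
  let after_times := PySem.Int.mod k (dq.length : Int)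
  let r := pvEatLoop dq.length times f dq after_times
  (r.1, r.2.2, r.2.1, times)

-- the `while times != 0 and len(eat_dq) != 0` loop; fuel food_times.length + 4 suffices on every
-- input (each call either shrinks the deque or forces times = 0 within two further calls)
def pvLoopA : Nat → List Int → Int → List Int → Int → List Int × Int × List Int × Int
  | 0, f, k, dq, times => (f, k, dq, times)
  | Nat.succ fuel, f, k, dq, times =>
    if times ≠ 0 ∧ dq.length ≠ 0 then
      let r := pvEat f k dq
      pvLoopA fuel r.1 r.2.1 r.2.2.1 r.2.2.2
    else (f, k, dq, times)

-- `for i in range(k): num = eat_dq.popleft(); eat_dq.append(num)`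
def pvRot : Nat → List Int → List Int
  | 0, dq => dq
  | Nat.succ _, [] => []               -- unreachable: rotation of a nonempty deque stays nonempty
  | Nat.succ j, x :: rest => pvRot j (rest ++ [x])

def solution (food_times : List Int) (k : Int) : Int :=
  let st := pvLoopA (food_times.length + 4) food_times k
      (PySem.List.pyRange 0 (food_times.length : Int) 1) 1
  let dq := st.2.2.1
  if dq.length = 0 then -1
  else (pvRot st.2.1.toNat dq).headD 0 + 1

-- ===== PORT B =====
-- `while pos < n and vals[pos] <= bound` of Source B, over the suffix vals.drop pos: returns (steps, after)
def pvAdvance (vs : List Int) (bound : Int) (after : Int) : Nat × Int :=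
  match vs with
  | [] => (0, after)
  | v :: tl =>
    if v ≤ bound then
      let r := pvAdvance tl bound (after + (bound - v))
      (r.1 + 1, r.2)
    else (0, after)

-- Source B's outer while loop, same fuel as A's port
def pvLoopB : Nat → List Int → Nat → Nat → Int → Int → Int → Nat × Int × Int
  | 0, _, _, pos, _, k, times => (pos, k, times)
  | Nat.succ fuel, vals, n, pos, offset, k, times =>
    if times ≠ 0 ∧ pos < n then
      let m : Int := (n : Int) - (pos : Int)
      let t := PySem.Int.floordiv k m
      let r := PySem.Int.mod k m
      let bound := offset + t
      let a := pvAdvance (vals.drop pos) bound r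
      pvLoopB fuel vals n (pos + a.1) bound a.2 t
    else (pos, k, times)

def solution_alt (food_times : List Int) (k : Int) : Int :=
  let n := food_times.length
  let order := PySem.List.sorted (PySem.List.pyRange 0 (n : Int) 1)
      (fun i => PySem.List.pyGetD food_times i 0) false
  let vals := order.map (fun i => PySem.List.pyGetD food_times i 0)
  let st := pvLoopB (n + 4) vals n 0 0 k 1
  if st.1 = n then -1
  else
    let rem := PySem.List.sorted (order.drop st.1) (fun x => x) false
    PySem.List.pyGetD rem (PySem.Int.mod st.2.1 ((n : Int) - (st.1 : Int))) 0 + 1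

-- ===== PRECONDITION & SPEC =====
def Spec_solution (food_times : List Int) (k : Int) (out : Int) : Prop := out = solution_alt food_times k
instance (food_times : List Int) (k : Int) (out : Int) : Decidable (Spec_solution food_times k out) := by unfold Spec_solution; infer_instance

-- ===== CLAIM (what is proved, stated in full; the proofs are below) =====
def Claim_equal_solution : Prop := ∀ (food_times : List Int) (k : Int), Dom_solution food_times k → Spec_solution food_times k (solution food_times k)


-- ===== LEMMAS AND PROOFS =====

-- current eating time of food e (reads the ORIGINAL list; A mutates a copy of it in the port's state)
def pvVal (ft : List Int) (e : Int) : Int := PySem.List.pyGetD ft e 0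

-- the sorted index order B builds once
def pvOrder (ft : List Int) : List Int :=
  PySem.List.sorted (PySem.List.pyRange 0 (ft.length : Int) 1)
    (fun i => PySem.List.pyGetD ft i 0) false

def pvVals (ft : List Int) : List Int := (pvOrder ft).map (fun i => PySem.List.pyGetD ft i 0)

-- simulation invariant: A's deque is the ascending list of surviving indices, B's pointer/offset
-- describe the same survivors, and A's mutated list agrees with original-value-minus-offset on them
def pvInv (ft f dq : List Int) (pos : Nat) (offset : Int) : Prop :=
  pos ≤ ft.length ∧ f.length = ft.length ∧ dq.Pairwise (· < ·) ∧
  dq.Perm ((pvOrder ft).drop pos) ∧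
  ∀ e ∈ dq, PySem.List.pyGetD f e 0 = pvVal ft e - offset

lemma order_perm (ft : List Int) :
    (pvOrder ft).Perm (PySem.List.pyRange 0 (ft.length : Int) 1) := by
  exact PySem.List.sorted_perm _ _ _

lemma order_length (ft : List Int) : (pvOrder ft).length = ft.length := by
  have := (order_perm ft).length_eq
  simpa [PySem.List.length_pyRange_one] using this

lemma mem_order_bounds (ft : List Int) (e : Int) (he : e ∈ pvOrder ft) :
    0 ≤ e ∧ e < (ft.length : Int) := by
  have := (order_perm ft).mem_iff.mp he
  simpa [PySem.List.mem_pyRange_one] using this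

lemma order_key_pairwise (ft : List Int) :
    (pvOrder ft).Pairwise (fun a b => pvVal ft a ≤ pvVal ft b) := by
  exact PySem.List.sorted_pairwise _ _

-- pointwise description of Python's `food_times[e] = v` followed by reads (valid nonneg indices)
lemma pyGetD_pySetD_self (f : List Int) (e v : Int) (h0 : 0 ≤ e) (h1 : e < (f.length : Int)) :
    PySem.List.pyGetD (PySem.List.pySetD f e v) e 0 = v := by
  rw [PySem.List.pySetD_of_nonneg _ _ h0, PySem.List.pyGetD_of_nonneg _ _ h0]
  have he : e.toNat < f.length := by omega
  simp [List.getD, he]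

lemma pyGetD_pySetD_ne (f : List Int) (e v j : Int) (h0 : 0 ≤ e) (hj : 0 ≤ j) (hne : j ≠ e) :
    PySem.List.pyGetD (PySem.List.pySetD f e v) j 0 = PySem.List.pyGetD f j 0 := by
  rw [PySem.List.pySetD_of_nonneg _ _ h0, PySem.List.pyGetD_of_nonneg _ _ hj,
    PySem.List.pyGetD_of_nonneg _ _ hj]
  have hne' : e.toNat ≠ j.toNat := by omega
  simp [List.getD, List.getElem?_set_ne hne']

lemma length_pySetD' (f : List Int) (e v : Int) :
    (PySem.List.pySetD f e v).length = f.length := PySem.List.length_pySetD f e v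

-- characterisation of A's inner deque sweep
lemma pvEatLoop_spec (t : Int) :
    ∀ (xs acc f : List Int) (after : Int),
      xs.Nodup → (∀ e ∈ xs, 0 ≤ e ∧ e < (f.length : Int)) →
      (pvEatLoop xs.length t f (xs ++ acc) after).2.1
          = acc ++ xs.filter (fun e => !decide (PySem.List.pyGetD f e 0 ≤ t))
      ∧ (pvEatLoop xs.length t f (xs ++ acc) after).2.2
          = after + ((xs.filter (fun e => decide (PySem.List.pyGetD f e 0 ≤ t))).map
              (fun e => t - PySem.List.pyGetD f e 0)).sum
      ∧ (pvEatLoop xs.length t f (xs ++ acc) after).1.length = f.length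
      ∧ (∀ j : Int, 0 ≤ j → j ∉ xs →
            PySem.List.pyGetD (pvEatLoop xs.length t f (xs ++ acc) after).1 j 0
              = PySem.List.pyGetD f j 0)
      ∧ (∀ j ∈ xs, ¬ PySem.List.pyGetD f j 0 ≤ t →
            PySem.List.pyGetD (pvEatLoop xs.length t f (xs ++ acc) after).1 j 0
              = PySem.List.pyGetD f j 0 - t) := by
  intro xs
  induction xs with
  | nil =>
    intro acc f after _ _
    refine ⟨by simp [pvEatLoop], by simp [pvEatLoop], by simp [pvEatLoop], ?_, by simp⟩
    intro j _ _; simp [pvEatLoop]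
  | cons e rest ih =>
    intro acc f after hnd hval
    have hnd' : rest.Nodup := (List.nodup_cons.mp hnd).2
    have henr : e ∉ rest := (List.nodup_cons.mp hnd).1
    have he := hval e (by simp)
    by_cases hle : PySem.List.pyGetD f e 0 ≤ t
    · -- food e finished this round
      have hred : pvEatLoop (e :: rest).length t f ((e :: rest) ++ acc) after
          = pvEatLoop rest.length t (PySem.List.pySetD f e 0) (rest ++ acc)
              (after + (t - PySem.List.pyGetD f e 0)) := by
        simp [pvEatLoop, hle]
      have hval' : ∀ e' ∈ rest, 0 ≤ e' ∧ e' < ((PySem.List.pySetD f e 0).length : Int) := by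
        intro e' h'; rw [length_pySetD']; exact hval e' (by simp [h'])
      have hsame : ∀ e' ∈ rest,
          PySem.List.pyGetD (PySem.List.pySetD f e 0) e' 0 = PySem.List.pyGetD f e' 0 := by
        intro e' h'
        exact pyGetD_pySetD_ne f e 0 e' he.1 (hval e' (by simp [h'])).1
          (by rintro rfl; exact henr h')
      obtain ⟨h1, h2, h3, h4, h5⟩ := ih acc (PySem.List.pySetD f e 0)
        (after + (t - PySem.List.pyGetD f e 0)) hnd' hval'
      have hfilt1 : rest.filter (fun e' => !decide (PySem.List.pyGetD (PySem.List.pySetD f e 0) e' 0 ≤ t))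
          = rest.filter (fun e' => !decide (PySem.List.pyGetD f e' 0 ≤ t)) :=
        List.filter_congr (by intro e' h'; rw [hsame e' h'])
      have hfilt2 : rest.filter (fun e' => decide (PySem.List.pyGetD (PySem.List.pySetD f e 0) e' 0 ≤ t))
          = rest.filter (fun e' => decide (PySem.List.pyGetD f e' 0 ≤ t)) :=
        List.filter_congr (by intro e' h'; rw [hsame e' h'])
      refine ⟨?_, ?_, ?_, ?_, ?_⟩
      · rw [hred, h1, hfilt1]; simp [hle]
      · rw [hred, h2, hfilt2]
        have hmap : (rest.filter (fun e' => decide (PySem.List.pyGetD f e' 0 ≤ t))).map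
              (fun e' => t - PySem.List.pyGetD (PySem.List.pySetD f e 0) e' 0)
            = (rest.filter (fun e' => decide (PySem.List.pyGetD f e' 0 ≤ t))).map
              (fun e' => t - PySem.List.pyGetD f e' 0) := by
          refine List.map_congr_left ?_
          intro e' h'
          rw [hsame e' (List.mem_of_mem_filter h')]
        rw [hmap]
        simp [hle]
        ring
      · rw [hred, h3, length_pySetD']
      · intro j hj0 hj
        rw [hred, h4 j hj0 (by intro h; exact hj (by simp [h]))]
        exact pyGetD_pySetD_ne f e 0 j he.1 hj0 (by rintro rfl; exact hj (by simp))
      · intro j hj hcond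
        rcases List.mem_cons.mp hj with rfl | hj'
        · exact absurd hle hcond
        · rw [hred, h5 j hj' (by rw [hsame j hj']; exact hcond), hsame j hj']
    · -- food e survives this round
      have hred : pvEatLoop (e :: rest).length t f ((e :: rest) ++ acc) after
          = pvEatLoop rest.length t (PySem.List.pySetD f e (PySem.List.pyGetD f e 0 - t))
              (rest ++ (acc ++ [e])) after := by
        simp [pvEatLoop, hle, List.append_assoc]
      set f' := PySem.List.pySetD f e (PySem.List.pyGetD f e 0 - t) with hf'
      have hval' : ∀ e' ∈ rest, 0 ≤ e' ∧ e' < (f'.length : Int) := by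
        intro e' h'; rw [hf', length_pySetD']; exact hval e' (by simp [h'])
      have hsame : ∀ e' ∈ rest, PySem.List.pyGetD f' e' 0 = PySem.List.pyGetD f e' 0 := by
        intro e' h'
        exact pyGetD_pySetD_ne f e _ e' he.1 (hval e' (by simp [h'])).1
          (by rintro rfl; exact henr h')
      obtain ⟨h1, h2, h3, h4, h5⟩ := ih (acc ++ [e]) f' after hnd' hval'
      have hfilt1 : rest.filter (fun e' => !decide (PySem.List.pyGetD f' e' 0 ≤ t))
          = rest.filter (fun e' => !decide (PySem.List.pyGetD f e' 0 ≤ t)) :=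
        List.filter_congr (by intro e' h'; rw [hsame e' h'])
      have hfilt2 : rest.filter (fun e' => decide (PySem.List.pyGetD f' e' 0 ≤ t))
          = rest.filter (fun e' => decide (PySem.List.pyGetD f e' 0 ≤ t)) :=
        List.filter_congr (by intro e' h'; rw [hsame e' h'])
      refine ⟨?_, ?_, ?_, ?_, ?_⟩
      · rw [hred, h1, hfilt1]; simp [hle]
      · rw [hred, h2, hfilt2]
        have hmap : (rest.filter (fun e' => decide (PySem.List.pyGetD f e' 0 ≤ t))).map
              (fun e' => t - PySem.List.pyGetD f' e' 0)
            = (rest.filter (fun e' => decide (PySem.List.pyGetD f e' 0 ≤ t))).map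
              (fun e' => t - PySem.List.pyGetD f e' 0) := by
          refine List.map_congr_left ?_
          intro e' h'
          rw [hsame e' (List.mem_of_mem_filter h')]
        rw [hmap]
        simp [hle]
      · rw [hred, h3, hf', length_pySetD']
      · intro j hj0 hj
        rw [hred, h4 j hj0 (by intro h; exact hj (by simp [h])), hf']
        exact pyGetD_pySetD_ne f e _ j he.1 hj0 (by rintro rfl; exact hj (by simp))
      · intro j hj hcond
        rcases List.mem_cons.mp hj with rfl | hj'
        · rw [hred, h4 j he.1 henr, hf']
          exact pyGetD_pySetD_self f j _ he.1 he.2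
        · rw [hred, h5 j hj' (by rw [hsame j hj']; exact hcond), hsame j hj']

-- characterisation of B's pointer advance
lemma pvAdvance_spec :
    ∀ (ws : List Int) (bound after : Int),
      pvAdvance ws bound after
        = ((ws.takeWhile (fun v => decide (v ≤ bound))).length,
           after + ((ws.takeWhile (fun v => decide (v ≤ bound))).map (fun v => bound - v)).sum) := by
  intro ws
  induction ws with
  | nil => intro bound after; simp [pvAdvance]
  | cons v tl ih =>
    intro bound after
    by_cases h : v ≤ bound
    · simp [pvAdvance, h, ih bound (after + (bound - v))]
      ring
    · simp [pvAdvance, h]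

-- on a list nondecreasing under `key`, the ≤-bound prefix IS the ≤-bound filter
lemma takeWhile_filter_of_sorted {α : Type} (key : α → Int) (b : Int) :
    ∀ (S : List α), S.Pairwise (fun x y => key x ≤ key y) →
      S.takeWhile (fun x => decide (key x ≤ b)) = S.filter (fun x => decide (key x ≤ b))
      ∧ S.dropWhile (fun x => decide (key x ≤ b)) = S.filter (fun x => !decide (key x ≤ b)) := by
  intro S
  induction S with
  | nil => simp
  | cons x tl ih =>
    intro hp
    have htl := ih (List.Pairwise.sublist (List.sublist_cons_self x tl) hp)
    by_cases h : key x ≤ b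
    · simp [h, htl.1, htl.2]
    · have hall : ∀ y ∈ tl, ¬ key y ≤ b := by
        intro y hy hyb
        exact h (le_trans (List.rel_of_pairwise_cons hp hy) hyb)
      constructor
      · simp only [List.takeWhile_cons, List.filter_cons, h]
        simp only [decide_eq_true_eq]
        rw [List.filter_eq_nil_iff.mpr (by intro y hy; simpa using hall y hy)]
        simp
      · simp only [List.dropWhile_cons, List.filter_cons, h]
        simp only [decide_eq_true_eq]
        rw [List.filter_eq_self.mpr (by intro y hy; simpa using hall y hy)]
        simp

-- one round: A's `eat` and B's pointer advance produce matching states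
lemma round_sim (ft f dq : List Int) (pos : Nat) (offset k : Int)
    (hI : pvInv ft f dq pos offset) (hne : dq ≠ []) :
    pvInv ft (pvEat f k dq).1 (pvEat f k dq).2.2.1
      (pos + (pvAdvance ((pvVals ft).drop pos)
         (offset + PySem.Int.floordiv k ((ft.length : Int) - (pos : Int)))
         (PySem.Int.mod k ((ft.length : Int) - (pos : Int)))).1)
      (offset + PySem.Int.floordiv k ((ft.length : Int) - (pos : Int)))
    ∧ (pvEat f k dq).2.1 = (pvAdvance ((pvVals ft).drop pos)
         (offset + PySem.Int.floordiv k ((ft.length : Int) - (pos : Int)))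
         (PySem.Int.mod k ((ft.length : Int) - (pos : Int)))).2
    ∧ (pvEat f k dq).2.2.2 = PySem.Int.floordiv k ((ft.length : Int) - (pos : Int))
    ∧ 0 ≤ (pvAdvance ((pvVals ft).drop pos)
         (offset + PySem.Int.floordiv k ((ft.length : Int) - (pos : Int)))
         (PySem.Int.mod k ((ft.length : Int) - (pos : Int)))).2 := by
  obtain ⟨hpos, hflen, hpw, hperm, hfval⟩ := hI
  set n := ft.length with hn
  set S : List Int := (pvOrder ft).drop pos with hS
  have hlenS : S.length = n - pos := by rw [hS, List.length_drop, order_length]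
  have hlen : dq.length = n - pos := by rw [hperm.length_eq, hlenS]
  have hposlt : pos < n := by
    have h0 : dq.length ≠ 0 := by simpa using hne
    omega
  have hmcast : (dq.length : Int) = (n : Int) - (pos : Int) := by omega
  have hm : (0 : Int) < (n : Int) - (pos : Int) := by omega
  set t := PySem.Int.floordiv k ((n : Int) - (pos : Int)) with ht
  set bound := offset + t with hbound
  set r0 := PySem.Int.mod k ((n : Int) - (pos : Int)) with hr0
  have hbounds : ∀ e ∈ dq, 0 ≤ e ∧ e < (n : Int) := by
    intro e he'
    exact mem_order_bounds ft e (List.mem_of_mem_drop (hperm.mem_iff.mp he'))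
  have hnodup : dq.Nodup := hpw.imp (fun h => ne_of_lt h)
  have hboundsf : ∀ e ∈ dq, 0 ≤ e ∧ e < (f.length : Int) := by
    intro e he'; have := hbounds e he'; omega
  obtain ⟨h1, h2, h3, h4, h5⟩ := pvEatLoop_spec t dq [] f r0 hnodup hboundsf
  rw [List.append_nil] at h1 h2 h3 h4 h5
  have hEat : pvEat f k dq
      = ((pvEatLoop dq.length t f dq r0).1, (pvEatLoop dq.length t f dq r0).2.2,
         (pvEatLoop dq.length t f dq r0).2.1, t) := by
    simp only [pvEat, hmcast, ← ht, ← hr0]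
  -- predicate bridges (A tests the mutated list, B tests original value against the bound)
  have hPneg : ∀ e ∈ dq,
      (!decide (PySem.List.pyGetD f e 0 ≤ t)) = (!decide (pvVal ft e ≤ bound)) := by
    intro e he'
    have := hfval e he'
    congr 1
    exact decide_eq_decide.mpr (by rw [this]; omega)
  have hPpos : ∀ e ∈ dq,
      (decide (PySem.List.pyGetD f e 0 ≤ t)) = (decide (pvVal ft e ≤ bound)) := by
    intro e he'
    have := hfval e he'
    exact decide_eq_decide.mpr (by rw [this]; omega)
  have hdq' : (pvEatLoop dq.length t f dq r0).2.1
      = dq.filter (fun e => !decide (pvVal ft e ≤ bound)) := by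
    rw [h1]; simp only [List.nil_append]; exact List.filter_congr hPneg
  -- B's advance over the sorted value suffix
  have hws : (pvVals ft).drop pos = S.map (pvVal ft) := by
    rw [pvVals, hS, ← List.map_drop]; rfl
  have hSpw : S.Pairwise (fun a b => pvVal ft a ≤ pvVal ft b) :=
    (order_key_pairwise ft).sublist (List.drop_sublist _ _)
  obtain ⟨hTW, hDW⟩ := takeWhile_filter_of_sorted (pvVal ft) bound S hSpw
  have hq : (fun x => decide (x ≤ bound)) ∘ (pvVal ft)
      = (fun e => decide (pvVal ft e ≤ bound)) := rfl
  have hadv : pvAdvance ((pvVals ft).drop pos) bound r0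
      = ((S.filter (fun e => decide (pvVal ft e ≤ bound))).length,
         r0 + ((S.filter (fun e => decide (pvVal ft e ≤ bound))).map
            (fun e => bound - pvVal ft e)).sum) := by
    rw [hws, pvAdvance_spec, List.takeWhile_map, hq, hTW]
    simp [List.map_map, Function.comp_def]
  set c := (S.filter (fun e => decide (pvVal ft e ≤ bound))).length with hc
  -- the two removal multisets agree, so the refunded budgets agree
  have hpermKeep : (dq.filter (fun e => decide (pvVal ft e ≤ bound))).Perm
      (S.filter (fun e => decide (pvVal ft e ≤ bound))) := hperm.filter _
  have hsums : ((dq.filter (fun e => decide (PySem.List.pyGetD f e 0 ≤ t))).map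
        (fun e => t - PySem.List.pyGetD f e 0)).sum
      = ((S.filter (fun e => decide (pvVal ft e ≤ bound))).map
        (fun e => bound - pvVal ft e)).sum := by
    rw [List.filter_congr hPpos]
    have hmapc : (dq.filter (fun e => decide (pvVal ft e ≤ bound))).map
          (fun e => t - PySem.List.pyGetD f e 0)
        = (dq.filter (fun e => decide (pvVal ft e ≤ bound))).map
          (fun e => bound - pvVal ft e) := by
      refine List.map_congr_left ?_
      intro e he'
      rw [hfval e (List.mem_of_mem_filter he')]; ring
    rw [hmapc]
    exact (hpermKeep.map _).sum_eq
  have hsum_nonneg : 0 ≤ ((S.filter (fun e => decide (pvVal ft e ≤ bound))).map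
      (fun e => bound - pvVal ft e)).sum := by
    refine List.sum_nonneg ?_
    intro x hx
    obtain ⟨e, he', rfl⟩ := List.mem_map.mp hx
    have := (List.mem_filter.mp he').2
    simp only [decide_eq_true_eq] at this
    omega
  -- survivors in sorted order: dropping the consumed prefix is filtering by the bound
  have hdropS : (pvOrder ft).drop (pos + c)
      = S.filter (fun e => !decide (pvVal ft e ≤ bound)) := by
    rw [← List.drop_drop, ← hS, ← hDW]
    have hcl : c = (S.takeWhile (fun x => decide (pvVal ft x ≤ bound))).length := by
      rw [hc, ← hTW]
    rw [hcl]
    have h := List.drop_left (l₁ := S.takeWhile (fun x => decide (pvVal ft x ≤ bound)))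
      (l₂ := S.dropWhile (fun x => decide (pvVal ft x ≤ bound)))
    rwa [List.takeWhile_append_dropWhile] at h
  have hclen : c ≤ n - pos := by
    have := List.length_filter_le (fun e => decide (pvVal ft e ≤ bound)) S
    omega
  have hA1len : (pvEat f k dq).1.length = ft.length := by
    rw [hEat]; exact h3.trans hflen
  have hAdq : (pvEat f k dq).2.2.1 = dq.filter (fun e => !decide (pvVal ft e ≤ bound)) := by
    rw [hEat]; exact hdq'
  have hAafter : (pvEat f k dq).2.1
      = r0 + ((S.filter (fun e => decide (pvVal ft e ≤ bound))).map
          (fun e => bound - pvVal ft e)).sum := by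
    rw [hEat]
    simpa using h2.trans (by rw [hsums])
  have hAt : (pvEat f k dq).2.2.2 = t := by rw [hEat]
  have hadv1 : (pvAdvance ((pvVals ft).drop pos) bound r0).1 = c := by rw [hadv]
  have hadv2 : (pvAdvance ((pvVals ft).drop pos) bound r0).2
      = r0 + ((S.filter (fun e => decide (pvVal ft e ≤ bound))).map
          (fun e => bound - pvVal ft e)).sum := by rw [hadv]
  refine ⟨⟨?_, ?_, ?_, ?_, ?_⟩, ?_, ?_, ?_⟩
  · rw [hadv1]; omega
  · exact hA1len
  · rw [hAdq]; exact hpw.filter _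
  · rw [hAdq, hadv1, hdropS]
    exact hperm.filter _
  · rw [hAdq]
    intro e he'
    have hmem := List.mem_of_mem_filter he'
    have hkeep := (List.mem_filter.mp he').2
    simp only [Bool.not_eq_eq_eq_not, Bool.not_true, decide_eq_false_iff_not] at hkeep
    have hcond : ¬ PySem.List.pyGetD f e 0 ≤ t := by
      rw [hfval e hmem]; omega
    rw [hEat, h5 e hmem hcond, hfval e hmem, pvVal]
    ring
  · rw [hAafter, hadv2]
  · exact hAt
  · rw [hadv2]
    have := PySem.Int.mod_nonneg k hm
    rw [← hr0] at this
    omega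


-- lockstep simulation of the two while loops (same fuel on both sides)
lemma loop_sim :
    ∀ (fuel : Nat) (ft f dq : List Int) (pos : Nat) (offset k times : Int),
      pvInv ft f dq pos offset →
      ∃ offset',
        pvInv ft (pvLoopA fuel f k dq times).1 (pvLoopA fuel f k dq times).2.2.1
          (pvLoopB fuel (pvVals ft) ft.length pos offset k times).1 offset'
        ∧ (pvLoopA fuel f k dq times).2.1
            = (pvLoopB fuel (pvVals ft) ft.length pos offset k times).2.1
        ∧ (0 ≤ (pvLoopA fuel f k dq times).2.1
           ∨ (pvLoopA fuel f k dq times = (f, k, dq, times)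
              ∧ pvLoopB fuel (pvVals ft) ft.length pos offset k times = (pos, k, times)
              ∧ (fuel = 0 ∨ ¬ (times ≠ 0 ∧ dq.length ≠ 0)))) := by
  intro fuel
  induction fuel with
  | zero =>
    intro ft f dq pos offset k times hI
    exact ⟨offset, hI, rfl, Or.inr ⟨rfl, rfl, Or.inl rfl⟩⟩
  | succ fuel ih =>
    intro ft f dq pos offset k times hI
    have hlen : dq.length = ft.length - pos := by
      rw [hI.2.2.2.1.length_eq, List.length_drop, order_length]
    by_cases hcond : times ≠ 0 ∧ dq.length ≠ 0
    · have hne : dq ≠ [] := by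
        intro h; exact hcond.2 (by simp [h])
      have hcondB : times ≠ 0 ∧ pos < ft.length := ⟨hcond.1, by have := hI.1; omega⟩
      obtain ⟨hI', hafter, htimes, hk0⟩ := round_sim ft f dq pos offset k hI hne
      have hA : pvLoopA (fuel + 1) f k dq times
          = pvLoopA fuel (pvEat f k dq).1 (pvEat f k dq).2.1 (pvEat f k dq).2.2.1
              (pvEat f k dq).2.2.2 := by
        simp only [pvLoopA]; rw [if_pos hcond]
      have hB : pvLoopB (fuel + 1) (pvVals ft) ft.length pos offset k times
          = pvLoopB fuel (pvVals ft) ft.length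
              (pos + (pvAdvance ((pvVals ft).drop pos)
                 (offset + PySem.Int.floordiv k ((ft.length : Int) - (pos : Int)))
                 (PySem.Int.mod k ((ft.length : Int) - (pos : Int)))).1)
              (offset + PySem.Int.floordiv k ((ft.length : Int) - (pos : Int)))
              (pvAdvance ((pvVals ft).drop pos)
                 (offset + PySem.Int.floordiv k ((ft.length : Int) - (pos : Int)))
                 (PySem.Int.mod k ((ft.length : Int) - (pos : Int)))).2
              (PySem.Int.floordiv k ((ft.length : Int) - (pos : Int))) := by
        simp only [pvLoopB]; rw [if_pos hcondB]
      rw [hafter, htimes] at hA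
      rw [hA, hB]
      obtain ⟨off', h1, h2, h3⟩ := ih ft (pvEat f k dq).1 (pvEat f k dq).2.2.1
        (pos + (pvAdvance ((pvVals ft).drop pos)
           (offset + PySem.Int.floordiv k ((ft.length : Int) - (pos : Int)))
           (PySem.Int.mod k ((ft.length : Int) - (pos : Int)))).1)
        (offset + PySem.Int.floordiv k ((ft.length : Int) - (pos : Int)))
        (pvAdvance ((pvVals ft).drop pos)
           (offset + PySem.Int.floordiv k ((ft.length : Int) - (pos : Int)))
           (PySem.Int.mod k ((ft.length : Int) - (pos : Int)))).2
        (PySem.Int.floordiv k ((ft.length : Int) - (pos : Int))) hI'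
      refine ⟨off', h1, h2, ?_⟩
      rcases h3 with h3 | ⟨hA3, _, _⟩
      · exact Or.inl h3
      · left
        rw [hA3]
        exact hk0
    · have hcondB : ¬ (times ≠ 0 ∧ pos < ft.length) := by
        intro h
        exact hcond ⟨h.1, by omega⟩
      have hA : pvLoopA (fuel + 1) f k dq times = (f, k, dq, times) := by
        simp only [pvLoopA]; rw [if_neg hcond]
      have hB : pvLoopB (fuel + 1) (pvVals ft) ft.length pos offset k times
          = (pos, k, times) := by
        simp only [pvLoopB]; rw [if_neg hcondB]
      rw [hA, hB]
      exact ⟨offset, hI, rfl, Or.inr ⟨rfl, rfl, Or.inr hcond⟩⟩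

lemma pvRot_eq_rotate : ∀ (j : Nat) (l : List Int), l ≠ [] → pvRot j l = l.rotate j := by
  intro j
  induction j with
  | zero => intro l _; simp [pvRot]
  | succ j ih =>
    intro l hl
    match l with
    | x :: rest =>
      rw [pvRot, List.rotate_cons_succ]
      exact ih (rest ++ [x]) (by simp)


lemma headD_eq_getElem (l : List Int) (h : l ≠ []) :
    l.headD 0 = l[0]'(List.length_pos_of_ne_nil h) := by
  cases l with
  | nil => simp at h
  | cons a t => simp

-- ===== VERDICT (by name: the statement is the Claim_ definition above) =====
theorem solution_spec : Claim_equal_solution := by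
  unfold Claim_equal_solution
  intro ft k _hdom
  unfold Spec_solution solution solution_alt
  set n := ft.length with hn
  have horder : PySem.List.sorted (PySem.List.pyRange 0 (n : Int) 1)
      (fun i => PySem.List.pyGetD ft i 0) false = pvOrder ft := rfl
  have hvals : (pvOrder ft).map (fun i => PySem.List.pyGetD ft i 0) = pvVals ft := rfl
  dsimp only
  rw [horder, hvals]
  have hInv0 : pvInv ft ft (PySem.List.pyRange 0 (n : Int) 1) 0 0 := by
    refine ⟨by omega, rfl, PySem.List.pairwise_lt_pyRange_one _ _, ?_, ?_⟩
    · simpa using (order_perm ft).symm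
    · intro e _; simp [pvVal]
  obtain ⟨off', hI, hk, hdisj⟩ := loop_sim (n + 4) ft ft
    (PySem.List.pyRange 0 (n : Int) 1) 0 0 k 1 hInv0
  set A := pvLoopA (n + 4) ft k (PySem.List.pyRange 0 (n : Int) 1) 1 with hA
  set B := pvLoopB (n + 4) (pvVals ft) n 0 0 k 1 with hB
  obtain ⟨hposle, _hflen, hpw, hperm, _hfv⟩ := hI
  have hlenF : A.2.2.1.length = n - B.1 := by
    rw [hperm.length_eq, List.length_drop, order_length]
  by_cases hnil : A.2.2.1.length = 0
  · have hBn : B.1 = n := by omega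
    rw [if_pos hnil, if_pos hBn]
  · have hBn : B.1 ≠ n := by omega
    rw [if_neg hnil, if_neg hBn]
    have hne : A.2.2.1 ≠ [] := by
      intro h; exact hnil (by rw [h]; rfl)
    have hkF : 0 ≤ A.2.1 := by
      rcases hdisj with h | ⟨hA3, _, h03⟩
      · exact h
      · exfalso
        rcases h03 with h03 | h03
        · omega
        · have h1 : (PySem.List.pyRange 0 (n : Int) 1).length = 0 := by
            by_contra hc
            exact h03 ⟨one_ne_zero, hc⟩
          have : A.2.2.1.length = 0 := by
            rw [hA3]
            exact h1
          exact hnil this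
    set m := A.2.2.1.length with hm
    have hmpos : 0 < m := Nat.pos_of_ne_zero hnil
    -- B's remaining list is exactly A's deque (ascending surviving indices)
    have hrem : PySem.List.sorted ((pvOrder ft).drop B.1) (fun x => x) false = A.2.2.1 :=
      PySem.List.sorted_id_eq_of_perm_of_pairwise _ _ hperm
        (hpw.imp (fun h => le_of_lt h))
    rw [hrem, ← hk]
    -- the index both sides select
    have hmc : ((n : Int) - (B.1 : Int)) = (m : Int) := by omega
    have hmodc : PySem.Int.mod A.2.1 ((n : Int) - (B.1 : Int))
        = ((A.2.1.toNat % m : Nat) : Int) := by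
      rw [hmc, PySem.Int.mod_eq_emod_of_pos (by omega)]
      conv_lhs => rw [← Int.toNat_of_nonneg hkF]
      omega
    rw [hmodc]
    have hidx : ((A.2.1.toNat % m : Nat) : Int) < (A.2.2.1.length : Int) := by
      have := Nat.mod_lt A.2.1.toNat hmpos
      omega
    rw [PySem.List.pyGetD_eq_getElem _ _ (by positivity) hidx]
    -- A rotates its deque k times and takes the head
    rw [pvRot_eq_rotate _ _ hne]
    have hrotne : (A.2.2.1.rotate A.2.1.toNat) ≠ [] := by
      intro h
      have := congrArg List.length h
      rw [List.length_rotate] at this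
      exact hne (List.length_eq_zero_iff.mp this)
    rw [headD_eq_getElem _ hrotne]
    congr 1
    rw [List.getElem_rotate]
    congr 1
    simp only [Int.toNat_natCast, ← hm]
    simp
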